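-- pv_equiv track=rewrite | github.com/CheungZeeCn/MyMLLM | libs/datasets/dataset_utils.py | collect_mask_spans
-- ===== SOURCE A (Python) =====
-- def collect_mask_spans(mask_flags):
--     spans = []
--     i = 0
--     while i < len(mask_flags):
--         i_label = mask_flags[i]
--         # begin
--         if i_label != 0:
--             j = i + 1
--             for j in range(i + 1, len(mask_flags)):
--                 j_label = mask_flags[j]
--                 if i_label == j_label:
--                     j += 1
--                     continue
--                 else:
--                     break
--             spans.append([i, j])
--             i = j
--             continue
--         else:
--             # next
--             i += 1
--     return spans
-- ===== SOURCE B (Python) =====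
-- def collect_mask_spans(mask_flags):
--     n = len(mask_flags)
--     starts = [i for i in range(n) if i == 0 or mask_flags[i] != mask_flags[i - 1]]
--     ends = starts[1:] + [n]
--     return [[s, e] for s, e in zip(starts, ends) if mask_flags[s] != 0]
-- ===== Notes on version B (the rewrite author's own statement) =====
-- stated objective: alternative
-- what changed: Replaces the stateful index scan with nested run-extension loops by declarative change-point detection: collect run-start indices with one comprehension, pair each start with the next start (or len) via zip, and keep the pairs whose label is nonzero.
import Mathlib
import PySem

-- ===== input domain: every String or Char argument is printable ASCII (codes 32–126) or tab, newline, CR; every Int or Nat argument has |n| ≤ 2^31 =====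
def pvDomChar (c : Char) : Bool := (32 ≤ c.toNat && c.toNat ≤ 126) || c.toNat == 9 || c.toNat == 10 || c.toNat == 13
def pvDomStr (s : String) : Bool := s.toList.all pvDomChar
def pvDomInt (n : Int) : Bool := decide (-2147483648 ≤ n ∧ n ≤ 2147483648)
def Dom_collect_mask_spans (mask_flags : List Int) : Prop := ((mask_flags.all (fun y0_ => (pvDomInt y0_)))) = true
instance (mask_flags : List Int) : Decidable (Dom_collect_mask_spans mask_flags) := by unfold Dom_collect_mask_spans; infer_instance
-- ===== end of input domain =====

-- B replaces A's stateful index scan (inner run-extension loop) by change-point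
-- detection: run-start indices via one filter, paired with their successors via zip
-- (objective: alternative; same O(n) cost).


-- ===== PORT A =====
-- inner for-loop of A: starting at j, advance while the label equals lbl;
-- returns the first index with a different label, or the length
def scanA (xs : List Int) (lbl : Int) (j : Nat) : Nat :=
  if h : j < xs.length then
    (if xs[j] = lbl then scanA xs lbl (j + 1) else j)
  else j
termination_by xs.length - j

-- the inner loop never moves j backwards (used for termination of goA)
theorem scanA_ge (xs : List Int) (lbl : Int) (j : Nat) : j ≤ scanA xs lbl j := by
  fun_induction scanA xs lbl j with
  | case1 j h heq ih => omega
  | case2 j h heq => omega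
  | case3 j h => omega

-- outer while-loop of A, with the accumulated spans list
def goA (xs : List Int) (i : Nat) (spans : List (List Int)) : List (List Int) :=
  if h : i < xs.length then
    (if xs[i] ≠ 0 then
      goA xs (scanA xs xs[i] (i + 1)) (spans ++ [[(i : Int), ((scanA xs xs[i] (i + 1)) : Int)]])
    else goA xs (i + 1) spans)
  else spans
termination_by xs.length - i
decreasing_by
  · have := scanA_ge xs xs[i] (i + 1)
    omega
  · omega

def collect_mask_spans (mask_flags : List Int) : List (List Int) :=
  goA mask_flags 0 []

-- ===== PORT B =====
def collect_mask_spans_alt (mask_flags : List Int) : List (List Int) :=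
  let n := mask_flags.length
  let starts := (List.range n).filter
    (fun i => i == 0 || mask_flags.getD i 0 != mask_flags.getD (i - 1) 0)
  let ends := starts.drop 1 ++ [n]
  ((starts.zip ends).filter (fun q => mask_flags.getD q.1 0 ≠ 0)).map
    (fun q => [(q.1 : Int), (q.2 : Int)])

-- ===== PRECONDITION & SPEC =====
def Spec_collect_mask_spans (mask_flags : List Int) (out : List (List Int)) : Prop := out = collect_mask_spans_alt mask_flags
instance (mask_flags : List Int) (out : List (List Int)) : Decidable (Spec_collect_mask_spans mask_flags out) := by unfold Spec_collect_mask_spans; infer_instance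

-- ===== CLAIM (what is proved, stated in full; the proofs are below) =====
def Claim_equal_collect_mask_spans : Prop := ∀ (mask_flags : List Int), Dom_collect_mask_spans mask_flags → Spec_collect_mask_spans mask_flags (collect_mask_spans mask_flags)

-- ===== LEMMAS AND PROOFS =====

-- canonical span list of a label list, by first-run decomposition, offset by pos
def runsSpans (xs : List Int) (pos : Nat) : List (List Int) :=
  match xs with
  | [] => []
  | a :: rest =>
      let k : Nat := (rest.takeWhile (· == a)).length + 1
      let tail := runsSpans (rest.dropWhile (· == a)) (pos + k)
      if a ≠ 0 then [(pos : Int), ((pos + k : Nat) : Int)] :: tail else tail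
termination_by xs.length
decreasing_by
  simp only [List.length_cons]
  have := List.length_dropWhile_le (p := (· == a)) rest
  omega

theorem scanA_eq (xs : List Int) (lbl : Int) (j : Nat) :
    scanA xs lbl j = j + ((xs.drop j).takeWhile (· == lbl)).length := by
  fun_induction scanA xs lbl j with
  | case1 j h heq ih =>
      have hd : xs.drop j = xs[j] :: xs.drop (j + 1) := List.drop_eq_getElem_cons h
      rw [ih, hd]
      simp [heq]
      omega
  | case2 j h heq =>
      have hd : xs.drop j = xs[j] :: xs.drop (j + 1) := List.drop_eq_getElem_cons h
      rw [hd]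
      simp [heq]
  | case3 j h =>
      have : xs.drop j = [] := List.drop_eq_nil_of_le (by omega)
      simp [this]

theorem drop_len_takeWhile (l : List Int) (p : Int → Bool) :
    l.drop (l.takeWhile p).length = l.dropWhile p := by
  nth_rewrite 2 [← List.takeWhile_append_dropWhile (p := p) (l := l)]
  rw [List.drop_left]

-- skipping a zero one position at a time reaches the same span list as
-- skipping the whole zero run at once
theorem runsSpans_zero (rest : List Int) (pos : Nat) :
    runsSpans (rest.dropWhile (· == (0 : Int)))
        (pos + (rest.takeWhile (· == (0 : Int))).length) = runsSpans rest pos := by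
  cases rest with
  | nil => simp
  | cons b r =>
      by_cases hb : b = 0
      · subst hb
        rw [runsSpans]
        simp only [List.takeWhile_cons, List.dropWhile_cons, beq_self_eq_true, if_true,
          List.length_cons]
        norm_num
      · have ht : (b :: r).takeWhile (· == (0 : Int)) = [] := by
          simp [hb]
        have hdw : (b :: r).dropWhile (· == (0 : Int)) = b :: r := by
          simp [hb]
        rw [ht, hdw]
        simp

theorem goA_eq (xs : List Int) (i : Nat) (spans : List (List Int)) :
    goA xs i spans = spans ++ runsSpans (xs.drop i) i := by
  fun_induction goA xs i spans with
  | case1 i spans h hne ih =>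
      have hd : xs.drop i = xs[i] :: xs.drop (i + 1) := List.drop_eq_getElem_cons h
      have hj : scanA xs xs[i] (i + 1)
          = (i + 1) + ((xs.drop (i + 1)).takeWhile (· == xs[i])).length := by
        have := scanA_eq xs xs[i] (i + 1)
        simpa using this
      have hdj : xs.drop (scanA xs xs[i] (i + 1))
          = (xs.drop (i + 1)).dropWhile (· == xs[i]) := by
        rw [hj, ← drop_len_takeWhile (xs.drop (i + 1)) (· == xs[i])]
        rw [List.drop_drop]
      rw [ih, hdj, hd]
      rw [runsSpans]
      simp only [if_pos hne]
      rw [hj]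
      have harith : (i + 1) + ((xs.drop (i + 1)).takeWhile (· == xs[i])).length
          = i + (((xs.drop (i + 1)).takeWhile (· == xs[i])).length + 1) := by omega
      rw [harith]
      simp
  | case2 i spans h hz ih =>
      have hd : xs.drop i = xs[i] :: xs.drop (i + 1) := List.drop_eq_getElem_cons h
      have h0 : xs[i] = 0 := by simpa using hz
      rw [ih, hd]
      rw [runsSpans]
      simp only [h0, ne_eq, not_true_eq_false, if_false]
      have harith : i + (((xs.drop (i + 1)).takeWhile (· == (0 : Int))).length + 1)
          = (i + 1) + ((xs.drop (i + 1)).takeWhile (· == (0 : Int))).length := by omega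
      rw [harith, runsSpans_zero (xs.drop (i + 1)) (i + 1)]
  | case3 i spans h =>
      have : xs.drop i = [] := List.drop_eq_nil_of_le (by omega)
      simp [this, runsSpans]

-- the filter predicate and start-index list of B, named for the proofs
def pB (l : List Int) (i : Nat) : Bool := i == 0 || l.getD i 0 != l.getD (i - 1) 0

def SB (l : List Int) : List Nat := (List.range l.length).filter (pB l)

theorem alt_def (l : List Int) : collect_mask_spans_alt l =
    (((SB l).zip ((SB l).drop 1 ++ [l.length])).filter (fun q => l.getD q.1 0 ≠ 0)).map
      (fun q => [(q.1 : Int), (q.2 : Int)]) := rfl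

theorem zip_shift (T : List Nat) (x n : Nat) :
    (x :: T).zip (T ++ [n]) = (x, T.headD n) :: T.zip (T.drop 1 ++ [n]) := by
  cases T <;> simp

-- the start-index list always begins with 0 (or is empty, for the empty list)
theorem SB_headD (l : List Int) : (SB l).headD l.length = 0 := by
  cases l with
  | nil => simp [SB]
  | cons b t =>
      have : SB (b :: t) = 0 :: (((List.range t.length).map Nat.succ).filter (pB (b :: t))) := by
        unfold SB
        rw [List.length_cons, List.range_succ_eq_map, List.filter_cons]
        simp [pB]
      rw [this]
      simp

theorem SB_run (a : Int) (k : Nat) (hk : 1 ≤ k) (ys : List Int)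
    (hy : ∀ b, ys.head? = some b → b ≠ a) :
    SB (List.replicate k a ++ ys) = 0 :: (SB ys).map (k + ·) := by
  have hga : ∀ j, j < k → (List.replicate k a ++ ys)[j]?.getD (0 : Int) = a := by
    intro j hj
    rw [List.getElem?_append_left (by simpa using hj)]
    simp [hj]
  have hgb : ∀ j, (List.replicate k a ++ ys)[k + j]?.getD (0 : Int) = ys[j]?.getD (0 : Int) := by
    intro j
    rw [List.getElem?_append_right (by simp : (List.replicate k a).length ≤ k + j)]
    simp
  unfold SB
  rw [List.length_append, List.length_replicate, List.range_add, List.filter_append,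
    List.filter_map]
  have h1 : List.filter (pB (List.replicate k a ++ ys)) (List.range k) = [0] := by
    have hc : ∀ i ∈ List.range k, pB (List.replicate k a ++ ys) i = (i == 0) := by
      intro i hi
      rw [List.mem_range] at hi
      cases i with
      | zero => simp [pB]
      | succ j =>
          have e1 := hga (j + 1) hi
          have e2 := hga j (by omega)
          simp [pB, e1, e2]
    rw [List.filter_congr hc]
    obtain ⟨k', rfl⟩ : ∃ k', k = k' + 1 := ⟨k - 1, by omega⟩
    rw [List.range_succ_eq_map, List.filter_cons]
    simp [List.filter_map, Function.comp_def]
  have h2 : ∀ i ∈ List.range ys.length,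
      (pB (List.replicate k a ++ ys) ∘ (k + ·)) i = pB ys i := by
    intro i hi
    rw [List.mem_range] at hi
    cases i with
    | zero =>
        obtain ⟨b, t, rfl⟩ : ∃ b t, ys = b :: t := by
          cases ys with
          | nil => simp at hi
          | cons b t => exact ⟨b, t, rfl⟩
        have e1 : (List.replicate k a ++ b :: t)[k + 0]?.getD (0 : Int) = b := by
          rw [hgb 0]; rfl
        have e2 := hga (k - 1) (by omega)
        have ek : k + 0 - 1 = k - 1 := by omega
        have hk0 : (k + 0 == 0) = false := by
          simp
          omega
        have hb : b ≠ a := hy b rfl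
        simp [pB, e2, hb]
    | succ j =>
        have e1 := hgb (j + 1)
        have e2 := hgb j
        have ek : k + (j + 1) - 1 = k + j := by omega
        simp [pB, ek, e1, e2]
  rw [List.filter_congr h2, h1]
  simp

theorem getD_shift (k : Nat) (a : Int) (ys : List Int) (j : Nat) :
    (List.replicate k a ++ ys)[k + j]?.getD (0 : Int) = ys[j]?.getD (0 : Int) := by
  rw [List.getElem?_append_right (by simp : (List.replicate k a).length ≤ k + j)]
  simp

theorem alt_run (a : Int) (k : Nat) (hk : 1 ≤ k) (ys : List Int)
    (hy : ∀ b, ys.head? = some b → b ≠ a) :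
    collect_mask_spans_alt (List.replicate k a ++ ys) =
      (if a ≠ 0 then [[(0 : Int), (k : Int)]] else [])
        ++ (collect_mask_spans_alt ys).map (List.map (· + (k : Int))) := by
  have hS := SB_run a k hk ys hy
  rw [alt_def, alt_def, hS]
  rw [List.length_append, List.length_replicate]
  rw [show ((0 : Nat) :: (SB ys).map (k + ·)).drop 1 = (SB ys).map (k + ·) from rfl]
  rw [zip_shift]
  have hhead : ((SB ys).map (k + ·)).headD (k + ys.length) = k := by
    have h0 := SB_headD ys
    cases hS' : SB ys with
    | nil =>
        rw [hS'] at h0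
        simp at h0
        simp [h0]
    | cons x T =>
        rw [hS'] at h0
        simp at h0
        simp [h0]
  rw [hhead]
  have hdrop : ((SB ys).map (k + ·)).drop 1 = ((SB ys).drop 1).map (k + ·) := by
    rw [← List.map_drop]
  have hzip : ((SB ys).map (k + ·)).zip ((((SB ys).drop 1).map (k + ·)) ++ [k + ys.length])
      = ((SB ys).zip ((SB ys).drop 1 ++ [ys.length])).map (Prod.map (k + ·) (k + ·)) := by
    rw [show [k + ys.length] = [ys.length].map (k + ·) from rfl, ← List.map_append, List.zip_map]
  rw [hdrop, hzip]
  rw [List.filter_cons]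
  have hfm : List.filter (fun q => decide ((List.replicate k a ++ ys).getD q.1 0 ≠ 0))
        (((SB ys).zip ((SB ys).drop 1 ++ [ys.length])).map (Prod.map (k + ·) (k + ·)))
      = (List.filter (fun q => decide (ys.getD q.1 0 ≠ 0))
          ((SB ys).zip ((SB ys).drop 1 ++ [ys.length]))).map (Prod.map (k + ·) (k + ·)) := by
    rw [List.filter_map]
    have hpt : ∀ q ∈ (SB ys).zip ((SB ys).drop 1 ++ [ys.length]),
        ((fun q => decide ((List.replicate k a ++ ys).getD q.1 0 ≠ 0))
          ∘ Prod.map (k + ·) (k + ·)) q = (fun q => decide (ys.getD q.1 0 ≠ 0)) q := by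
      intro q _
      simp only [Function.comp_apply, Prod.map_fst, List.getD_eq_getElem?_getD]
      simp [getD_shift]
    rw [List.filter_congr hpt]
  have hmm : ∀ P : List (Nat × Nat),
      (P.map (Prod.map (k + ·) (k + ·))).map (fun q => [(q.1 : Int), (q.2 : Int)])
        = (P.map (fun q => [(q.1 : Int), (q.2 : Int)])).map (List.map (· + (k : Int))) := by
    intro P
    rw [List.map_map, List.map_map]
    congr 1
    funext q
    simp [Prod.map]
    constructor <;> ring
  have h00 : (List.replicate k a ++ ys)[0]?.getD (0 : Int) = a := by
    rw [List.getElem?_append_left (by simpa using hk), List.getElem?_replicate,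
      if_pos (by omega : 0 < k)]
    rfl
  by_cases ha : a = 0
  · rw [if_neg (by simp [h00]; simp [ha]), if_neg (by simpa using ha)]
    rw [hfm, hmm]
    simp
  · rw [if_pos (by simp [h00]; simp [ha]), if_pos ha]
    rw [hfm]
    simp only [List.map_cons]
    rw [hmm]
    simp

theorem alt_nil : collect_mask_spans_alt [] = [] := rfl

theorem alt_eq_runs_aux (n : Nat) : ∀ xs : List Int, xs.length ≤ n → ∀ pos : Nat,
    (collect_mask_spans_alt xs).map (List.map (· + (pos : Int))) = runsSpans xs pos := by
  induction n with
  | zero =>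
      intro xs h pos
      have hx : xs = [] := List.eq_nil_of_length_eq_zero (by omega)
      subst hx
      rw [alt_nil, runsSpans]
      rfl
  | succ m ih =>
      intro xs h pos
      cases xs with
      | nil =>
          rw [alt_nil, runsSpans]
          rfl
      | cons a rest =>
          have hu : rest.takeWhile (· == a) = List.replicate (rest.takeWhile (· == a)).length a := by
            apply List.eq_replicate_of_mem
            intro b hb
            have := List.mem_takeWhile_imp hb
            simpa using this
          have hrep : a :: rest
              = List.replicate ((rest.takeWhile (· == a)).length + 1) a ++ rest.dropWhile (· == a) := by
            conv_lhs => rw [← List.takeWhile_append_dropWhile (p := (· == a)) (l := rest)]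
            rw [List.replicate_succ]
            conv_lhs => rw [hu]
            simp
          have hy' : ∀ b, (rest.dropWhile (· == a)).head? = some b → b ≠ a := by
            intro b hb
            have := List.head?_dropWhile_not (· == a) rest
            rw [hb] at this
            simpa using this
          have hlen : (rest.dropWhile (· == a)).length ≤ m := by
            have := List.length_dropWhile_le (p := (· == a)) (l := rest)
            simp at h
            omega
          rw [show collect_mask_spans_alt (a :: rest)
              = collect_mask_spans_alt (List.replicate ((rest.takeWhile (· == a)).length + 1) a
                  ++ rest.dropWhile (· == a)) from by rw [← hrep]]
          rw [alt_run a ((rest.takeWhile (· == a)).length + 1) (by omega) (rest.dropWhile (· == a)) hy']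
          rw [runsSpans]
          have htail : ((collect_mask_spans_alt (rest.dropWhile (· == a))).map
                  (List.map (· + (((rest.takeWhile (· == a)).length + 1 : Nat) : Int)))).map
                (List.map (· + (pos : Int)))
              = runsSpans (rest.dropWhile (· == a)) (pos + ((rest.takeWhile (· == a)).length + 1)) := by
            rw [← ih (rest.dropWhile (· == a)) hlen (pos + ((rest.takeWhile (· == a)).length + 1))]
            rw [List.map_map]
            congr 1
            funext sp
            simp only [Function.comp_apply, List.map_map]
            congr 1
            funext x
            simp only [Function.comp_apply]
            push_cast
            ring
          by_cases ha : a = 0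
          · rw [if_neg (by simpa using ha), if_neg (by simpa using ha)]
            rw [List.nil_append, htail]
          · rw [if_pos ha, if_pos ha]
            rw [List.map_append, htail]
            simp
            ring

theorem alt_eq_runs (xs : List Int) (pos : Nat) :
    (collect_mask_spans_alt xs).map (List.map (· + (pos : Int))) = runsSpans xs pos :=
  alt_eq_runs_aux xs.length xs (le_refl _) pos

-- ===== VERDICT (by name: the statement is the Claim_ definition above) =====
theorem collect_mask_spans_spec : Claim_equal_collect_mask_spans := by
  intro xs _
  show _ = _
  have h1 := goA_eq xs 0 []
  have h2 := alt_eq_runs xs 0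
  simp only [List.drop_zero, List.nil_append] at h1
  rw [collect_mask_spans, h1, ← h2]
  have : ∀ l : List (List Int), l.map (List.map (· + ((0:Nat) : Int))) = l := by
    intro l
    simp
  rw [this]
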